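-- pv_equiv track=rewrite | github.com/latex-access/latex-access | ueb.py | addHash
-- ===== SOURCE A (Python) =====
-- def addHash (latex):
--     """Put in ueb number signs.
--
--     In UEB a hash sign is put before a set of letters indicating a
--     number for instance the number 1 is written as #a so this function
--     applies the rules of ueb, and puts in the relevant hash signs."""
--     out=""
--     approachingnumb = False # Are we inside a number
--     count=0
--     for x in latex: # Go through the latex source
--         if approachingnumb and not x.isdigit ():
--             out+=x
--             approachingnumb = False
--             count+=1
--             continue
--         if not approachingnumb and x.isdigit (): # we begin a number, insert a # sign
--             approachingnumb = True
--             out+="#"+x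
--             count+=1
--             continue
--         out+=x # not inside a number and is not a digit, default handling
--         count+=1
--     return out
-- ===== SOURCE B (Python) =====
-- from itertools import groupby
--
-- def addHash(latex):
--     """Put in ueb number signs.
--
--     Run-wise rewrite: split the input into maximal runs of digit /
--     non-digit characters with itertools.groupby and prefix digit runs
--     with '#'."""
--     out = []
--     for isnum, group in groupby(latex, key=lambda c: c.isdigit()):
--         chunk = ''.join(group)
--         out.append('#' + chunk if isnum else chunk)
--     return ''.join(out)
-- ===== Notes on version B (the rewrite author's own statement) =====
-- stated objective: idiomatic
-- what changed: Replaces A's per-character boolean state machine (approachingnumb flag, dead count) with an itertools.groupby pass over maximal digit/non-digit runs, prefixing each digit run with a hash sign.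
import Mathlib
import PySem

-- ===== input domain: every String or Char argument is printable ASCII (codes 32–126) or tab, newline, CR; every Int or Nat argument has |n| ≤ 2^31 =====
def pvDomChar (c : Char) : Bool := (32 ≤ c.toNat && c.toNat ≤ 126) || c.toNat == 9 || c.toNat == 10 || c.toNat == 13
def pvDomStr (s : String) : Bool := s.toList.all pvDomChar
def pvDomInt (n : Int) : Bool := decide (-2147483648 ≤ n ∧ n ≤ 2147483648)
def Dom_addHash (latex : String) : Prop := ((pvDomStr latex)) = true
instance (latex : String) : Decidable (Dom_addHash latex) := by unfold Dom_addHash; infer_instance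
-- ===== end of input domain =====

-- B rewrites A's per-character state machine run-wise with itertools.groupby (objective: idiomatic; same cost).

-- ===== PORT A =====
-- A's loop: character by character, tracking whether we are inside a number
-- (out is accumulated as a List Char; Python's `out += s` is `out ++ s.toList`).
def addHashGo : List Char → List Char → Bool → Int → List Char
  | [], out, _, _ => out
  | x :: xs, out, approachingnumb, count =>
    if approachingnumb && !(PySem.Chars.isdigit x) then
      addHashGo xs (out ++ [x]) false (count + 1)
    else if !approachingnumb && PySem.Chars.isdigit x then
      addHashGo xs (out ++ ['#', x]) true (count + 1)
    else
      addHashGo xs (out ++ [x]) approachingnumb (count + 1)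

def addHash (latex : String) : String := String.mk (addHashGo latex.toList [] false 0)

-- ===== PORT B =====
-- B's groupby loop: each maximal run of same digit-class characters is one chunk;
-- digit runs get a '#' prefix.
def altGo : List Char → List Char
  | [] => []
  | x :: xs =>
    (if PySem.Chars.isdigit x then
        '#' :: x :: xs.takeWhile (fun c => PySem.Chars.isdigit c == PySem.Chars.isdigit x)
      else
        x :: xs.takeWhile (fun c => PySem.Chars.isdigit c == PySem.Chars.isdigit x))
    ++ altGo (xs.dropWhile (fun c => PySem.Chars.isdigit c == PySem.Chars.isdigit x))
termination_by l => l.length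
decreasing_by
  have := List.length_dropWhile_le (fun c => PySem.Chars.isdigit c == PySem.Chars.isdigit x) xs
  simp only [List.length_cons]; omega

def addHash_alt (latex : String) : String := String.mk (altGo latex.toList)

-- ===== PRECONDITION & SPEC =====
def Spec_addHash (latex : String) (out : String) : Prop := out = addHash_alt latex
instance (latex : String) (out : String) : Decidable (Spec_addHash latex out) := by unfold Spec_addHash; infer_instance

-- ===== CLAIM (what is proved, stated in full; the proofs are below) =====
def Claim_equal_addHash : Prop := ∀ (latex : String), Dom_addHash latex → Spec_addHash latex (addHash latex)

-- ===== LEMMAS AND PROOFS =====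

-- Pure (non-accumulator) form of A's loop body.
def runA : Bool → List Char → List Char
  | _, [] => []
  | b, x :: xs =>
    if b && !(PySem.Chars.isdigit x) then x :: runA false xs
    else if !b && PySem.Chars.isdigit x then '#' :: x :: runA true xs
    else x :: runA b xs

theorem addHashGo_eq (l : List Char) : ∀ (out : List Char) (b : Bool) (c : Int),
    addHashGo l out b c = out ++ runA b l := by
  induction l with
  | nil => intro out b c; simp [addHashGo, runA]
  | cons x xs ih =>
    intro out b c
    simp only [addHashGo, runA]
    split_ifs with h1 h2 <;> simp [ih, List.append_assoc]

-- altGo absorbs a maximal non-digit prefix.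
theorem altGo_nondigit (l : List Char) :
    altGo l = l.takeWhile (fun c => PySem.Chars.isdigit c == false)
      ++ altGo (l.dropWhile (fun c => PySem.Chars.isdigit c == false)) := by
  cases l with
  | nil => simp [altGo]
  | cons x xs =>
    by_cases h : PySem.Chars.isdigit x
    · simp [List.dropWhile_cons, h]
    · simp only [Bool.not_eq_true] at h
      simp [altGo, List.dropWhile_cons, h]

theorem runA_eq_altGo (n : ℕ) : ∀ l : List Char, l.length ≤ n →
    runA false l = altGo l ∧
    runA true l = l.takeWhile (fun c => PySem.Chars.isdigit c == true)
      ++ altGo (l.dropWhile (fun c => PySem.Chars.isdigit c == true)) := by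
  induction n with
  | zero =>
    intro l hl
    have : l = [] := List.eq_nil_of_length_eq_zero (Nat.le_zero.mp hl)
    subst this; simp [runA, altGo]
  | succ n ih =>
    intro l hl
    cases l with
    | nil => simp [runA, altGo]
    | cons x xs =>
      simp only [List.length_cons, Nat.succ_le_succ_iff] at hl
      have ihxs := ih xs hl
      by_cases h : PySem.Chars.isdigit x
      · constructor
        · simp [runA, altGo, h, ihxs.2]
        · simp [runA, h, List.dropWhile_cons, ihxs.2]
      · simp only [Bool.not_eq_true] at h
        constructor
        · simp [runA, altGo, h, ihxs.1, altGo_nondigit xs]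
        · simp [runA, h, List.dropWhile_cons, ihxs.1,
            altGo, altGo_nondigit xs]

-- ===== VERDICT (by name: the statement is the Claim_ definition above) =====
theorem addHash_spec : Claim_equal_addHash := by
  intro latex _
  unfold Spec_addHash addHash addHash_alt
  rw [addHashGo_eq, (runA_eq_altGo latex.toList.length latex.toList le_rfl).1]
  simp
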